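-- pv_equiv track=rewrite | github.com/saranshbht/codes-and-more-codes | misc/python/test.py | solve
-- ===== SOURCE A (Python) =====
-- period = [0] * 65
--
-- def solve(n):
--     ln = len(bin(n)[2:])
--     ans = 0
--     memo = [0] * 65
--     for i in range(1, ln):
--         for j in range(1, i):
--             if i % j == 0:
--                 ans += period[j]
--     # print ans
--     for i in range(1, ln):
--         if ln % i == 0:
--             val = 0
--             buf = bin(n)[2:i + 2]
--             try:
--                 val += int(buf[1:], 2) + 1
--             except ValueError:
--                 val = 1
--             if n < int(buf * (ln // i), 2):
--                 val -= 1
--             for j in range(1, i):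
--                 if i % j == 0:
--                     val -= memo[j]
--             # print i, buf, val
--             memo[i] = val
--             ans += val
--     return ans
-- ===== SOURCE B (Python) =====
-- def solve(n):
--     ln = len(bin(n)) - 2
--     divs = [i for i in range(1, ln) if ln % i == 0]
--
--     def val(i):
--         s = bin(n)[2:i + 2]
--         v = 1 if i == 1 else int(s[1:], 2) + 1
--         if n < int(s * (ln // i), 2):
--             v -= 1
--         return v
--
--     def mu(m):
--         r = 1
--         for p in range(2, m + 1):
--             if m % p == 0:
--                 m //= p
--                 r = -r
--                 if m % p == 0:
--                     r = 0
--         return r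
--
--     return sum(mu(i // d) * val(d) for i in divs for d in divs if i % d == 0)
-- ===== Notes on version B (the rewrite author's own statement) =====
-- stated objective: alternative
-- what changed: A accumulates per-divisor counts in a running memo table (each divisor's value subtracts the memo entries of its own divisors, in loop order); B removes the memo state entirely and computes the same total as a direct double sum over the proper divisors of the bit length, weighted by an explicitly computed Moebius function (Moebius inversion).
-- outside the precondition, e.g. on solve(-5): A raises ValueError, B raises ValueError
import Mathlib
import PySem

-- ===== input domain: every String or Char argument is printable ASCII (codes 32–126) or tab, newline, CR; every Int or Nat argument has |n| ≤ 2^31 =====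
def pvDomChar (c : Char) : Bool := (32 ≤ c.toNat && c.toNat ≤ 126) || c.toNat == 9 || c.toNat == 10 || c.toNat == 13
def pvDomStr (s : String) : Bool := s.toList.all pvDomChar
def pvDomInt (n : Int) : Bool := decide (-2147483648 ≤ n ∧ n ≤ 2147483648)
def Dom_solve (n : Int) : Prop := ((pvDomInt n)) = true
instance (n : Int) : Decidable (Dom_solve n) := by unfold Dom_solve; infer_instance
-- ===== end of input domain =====

-- B replaces A's running memo-table subtraction by a direct Möbius-inversion double sum over the
-- proper divisors of the bit length (objective: alternative decomposition, same cost).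

-- ===== PORT A =====
-- module constant: period = [0] * 65
def period : List Int := List.replicate 65 0

-- `.getD 0` stands where Python's uncaught int(...) would raise ValueError (only for n < 0, excluded by Pre_solve);
-- `i.toNat` in `memo[i] = val` is exact because i ≥ 1 there.
def solve (n : Int) : Int :=
  let b := (PySem.Int.pyBin n).toList                                         -- bin(n)
  let ln : Nat := (PySem.List.slice b (some 2) none).length                   -- ln = len(bin(n)[2:])
  let ans : Int :=
    (PySem.List.pyRange 1 (ln : Int) 1).foldl (fun ans i =>                   -- for i in range(1, ln):
      (PySem.List.pyRange 1 i 1).foldl (fun ans j =>                          --   for j in range(1, i):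
        if PySem.Int.mod i j = 0 then ans + PySem.List.pyGetD period j 0      --     if i % j == 0: ans += period[j]
        else ans) ans) 0
  let st : List Int × Int :=
    (PySem.List.pyRange 1 (ln : Int) 1).foldl (fun st i =>                    -- for i in range(1, ln):
      if PySem.Int.mod (ln : Int) i = 0 then                                  --   if ln % i == 0:
        -- try: val += int(buf[1:], 2) + 1 / except ValueError: val = 1  (none = the ValueError case)
        let val : Int :=
          (PySem.Int.ofCharsBase? (PySem.List.slice (PySem.List.slice b (some 2) (some (i + 2))) (some 1) none) 2).elim
            1 (fun v => 0 + (v + 1))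
        let val : Int :=                                                      --     if n < int(buf * (ln // i), 2): val -= 1
          if n < (PySem.Int.ofCharsBase? (PySem.List.pyRepeat (PySem.List.slice b (some 2) (some (i + 2))) (PySem.Int.floordiv (ln : Int) i)) 2).getD 0
          then val - 1 else val
        let val : Int :=                                                      --     for j in range(1, i): if i % j == 0: val -= memo[j]
          (PySem.List.pyRange 1 i 1).foldl (fun val j =>
            if PySem.Int.mod i j = 0 then val - PySem.List.pyGetD st.1 j 0 else val) val
        (st.1.set i.toNat val, st.2 + val)                                    --     memo[i] = val; ans += val
      else st) (List.replicate 65 0, ans)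
  st.2

-- ===== PORT B =====
-- `.getD 0` stands where Python's int(...) would raise ValueError (only for n < 0, excluded by Pre_solve)
def solveAltVal (n : Int) (b : List Char) (ln : Int) (i : Int) : Int :=
  let s := PySem.List.slice b (some 2) (some (i + 2))                         -- s = bin(n)[2:i+2]
  let v : Int :=
    if i = 1 then 1                                                           -- v = 1 if i == 1 else int(s[1:], 2) + 1
    else (PySem.Int.ofCharsBase? (PySem.List.slice s (some 1) none) 2).getD 0 + 1
  if n < (PySem.Int.ofCharsBase? (PySem.List.pyRepeat s (PySem.Int.floordiv ln i)) 2).getD 0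
  then v - 1 else v                                                           -- if n < int(s * (ln // i), 2): v -= 1

def solveAltMu (m : Int) : Int :=
  ((PySem.List.pyRange 2 (m + 1) 1).foldl (fun (st : Int × Int) p =>          -- for p in range(2, m + 1):
      if PySem.Int.mod st.1 p = 0 then                                        --   if m % p == 0:
        let m' := PySem.Int.floordiv st.1 p                                   --     m //= p ; r = -r
        (m', if PySem.Int.mod m' p = 0 then 0 else -st.2)                     --     if m % p == 0: r = 0
      else st) (m, 1)).2

def solve_alt (n : Int) : Int :=
  let b := (PySem.Int.pyBin n).toList                                         -- bin(n)
  let ln : Int := (b.length : Int) - 2                                        -- ln = len(bin(n)) - 2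
  let divs := (PySem.List.pyRange 1 ln 1).filter (fun i => PySem.Int.mod ln i == 0)
  (divs.flatMap (fun i =>
    (divs.filter (fun d => PySem.Int.mod i d == 0)).map (fun d =>
      solveAltMu (PySem.Int.floordiv i d) * solveAltVal n b ln d))).sum

-- ===== PRECONDITION & SPEC =====
-- Pre_solve excludes exactly the inputs n < 0, on which A raises ValueError
-- (bin(n) then starts "-0b" and A's uncaught int(buf * …, 2) sees the 'b'); B raises there too.
def Pre_solve (n : Int) : Prop := 0 ≤ n
instance (n : Int) : Decidable (Pre_solve n) := by unfold Pre_solve; infer_instance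
def pvWitness_solve : Int := 6

def Spec_solve (n : Int) (out : Int) : Prop := out = solve_alt n
instance (n : Int) (out : Int) : Decidable (Spec_solve n out) := by unfold Spec_solve; infer_instance

-- ===== CLAIM (what is proved, stated in full; the proofs are below) =====
def Claim_equal_solve : Prop := ∀ (n : Int), Dom_solve n → Pre_solve n → Spec_solve n (solve n)

-- ===== LEMMAS AND PROOFS =====

-- memo values of A's second loop, as a recursively built table: Mtab v k = [M 0, …, M (k-1)],
-- M k = v k − Σ_{1 ≤ j < k, j ∣ k} M j
def Mtab (v : Int → Int) : Nat → List Int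
  | 0 => []
  | k+1 => Mtab v k ++
      [v (k : Int) - (((List.range k).filter (fun j => decide (j ≠ 0 ∧ k % j = 0))).map
        (fun j => (Mtab v k).getD j 0)).sum]

def Mv (v : Int → Int) (k : Nat) : Int := (Mtab v (k+1)).getD k 0

lemma Mtab_length (v : Int → Int) (k : Nat) : (Mtab v k).length = k := by
  induction k with
  | zero => rfl
  | succ k ih => simp [Mtab, ih]

lemma Mtab_getD (v : Int → Int) : ∀ (k j : Nat), j < k → (Mtab v k).getD j 0 = Mv v j := by
  intro k
  induction k with
  | zero => intro j h; omega
  | succ k ih =>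
    intro j hj
    rcases Nat.lt_succ_iff_lt_or_eq.mp hj with h | h
    · rw [show Mtab v (k+1) = Mtab v k ++ _ from rfl]
      rw [List.getD_append _ _ _ _ (by rw [Mtab_length]; exact h)]
      exact ih j h
    · subst h; rfl

lemma Mv_rec (v : Int → Int) (k : Nat) :
    Mv v k = v (k : Int) -
      (((List.range k).filter (fun j => decide (j ≠ 0 ∧ k % j = 0))).map (fun j => Mv v j)).sum := by
  have h : Mv v k = v (k : Int) -
      (((List.range k).filter (fun j => decide (j ≠ 0 ∧ k % j = 0))).map
        (fun j => (Mtab v k).getD j 0)).sum := by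
    unfold Mv
    rw [show Mtab v (k+1) = Mtab v k ++ _ from rfl,
      List.getD_append_right _ _ _ _ (by rw [Mtab_length])]
    simp [Mtab_length]
  rw [h]
  congr 1
  refine congrArg _ (List.map_congr_left ?_)
  intro j hj
  have hj' : j < k := List.mem_range.mp (List.mem_filter.mp hj).1
  exact Mtab_getD v k j hj'

-- A's second loop, with the raw per-divisor value abstracted as v, computes a + Σ Mv over divisors
lemma replicate_getD_zero (j : Nat) : (List.replicate 65 (0 : Int)).getD j 0 = 0 := by
  by_cases hj : j < 65
  · exact List.getD_replicate _ hj
  · exact List.getD_eq_default _ _ (by simpa using Nat.le_of_not_lt hj)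

lemma pyRange_one_natCast (k : Nat) :
    PySem.List.pyRange 1 (k : Int) 1
      = List.map (fun j : Nat => (j : Int)) ((List.range k).filter (fun j : Nat => decide (j ≠ 0))) := by
  induction k with
  | zero => simp only [Nat.cast_zero]; decide
  | succ k ih =>
    rcases Nat.eq_zero_or_pos k with h | h
    · subst h; simp only [Nat.cast_one, Nat.zero_add]; decide
    · have h1 : (1 : Int) ≤ (k : Int) := by exact_mod_cast h
      rw [show ((k + 1 : Nat) : Int) = (k : Int) + 1 from by push_cast; ring]
      rw [PySem.List.pyRange_one_succ_right h1, ih, List.range_succ, List.filter_append, List.map_append]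
      congr 1
      simp [Nat.pos_iff_ne_zero.mp h]

lemma loopA_aux (L : Nat) (hL : L ≤ 63) (v : Int → Int) (a : Int) :
    ∀ (k : Nat), k ≤ L →
      (((PySem.List.pyRange 1 (k : Int) 1).foldl (fun (st : List Int × Int) i =>
        if PySem.Int.mod (L : Int) i = 0 then
          (st.1.set i.toNat ((PySem.List.pyRange 1 i 1).foldl
              (fun val j => if PySem.Int.mod i j = 0 then val - PySem.List.pyGetD st.1 j 0 else val) (v i)),
           st.2 + (PySem.List.pyRange 1 i 1).foldl
              (fun val j => if PySem.Int.mod i j = 0 then val - PySem.List.pyGetD st.1 j 0 else val) (v i))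
        else st) (List.replicate 65 0, a)).1.length = 65) ∧
      (∀ (j : Nat), ((PySem.List.pyRange 1 (k : Int) 1).foldl (fun (st : List Int × Int) i =>
        if PySem.Int.mod (L : Int) i = 0 then
          (st.1.set i.toNat ((PySem.List.pyRange 1 i 1).foldl
              (fun val j => if PySem.Int.mod i j = 0 then val - PySem.List.pyGetD st.1 j 0 else val) (v i)),
           st.2 + (PySem.List.pyRange 1 i 1).foldl
              (fun val j => if PySem.Int.mod i j = 0 then val - PySem.List.pyGetD st.1 j 0 else val) (v i))
        else st) (List.replicate 65 0, a)).1.getD j 0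
          = if j ≠ 0 ∧ j < k ∧ L % j = 0 then Mv v j else 0) ∧
      ((PySem.List.pyRange 1 (k : Int) 1).foldl (fun (st : List Int × Int) i =>
        if PySem.Int.mod (L : Int) i = 0 then
          (st.1.set i.toNat ((PySem.List.pyRange 1 i 1).foldl
              (fun val j => if PySem.Int.mod i j = 0 then val - PySem.List.pyGetD st.1 j 0 else val) (v i)),
           st.2 + (PySem.List.pyRange 1 i 1).foldl
              (fun val j => if PySem.Int.mod i j = 0 then val - PySem.List.pyGetD st.1 j 0 else val) (v i))
        else st) (List.replicate 65 0, a)).2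
        = a + (((PySem.List.pyRange 1 (k : Int) 1).filter (fun i => PySem.Int.mod (L : Int) i == 0)).map
            (fun i => Mv v i.toNat)).sum := by
  intro k
  induction k with
  | zero =>
    intro _
    rw [show ((0 : Nat) : Int) = 0 from rfl, show PySem.List.pyRange 1 0 1 = [] from by decide]
    refine ⟨by simp, fun j => ?_, by simp⟩
    have : ¬ (j ≠ 0 ∧ j < 0 ∧ L % j = 0) := by omega
    rw [if_neg this]
    exact replicate_getD_zero j
  | succ k ih =>
    intro hk1
    obtain ⟨h1, h2, h3⟩ := ih (by omega)
    rcases Nat.eq_zero_or_pos k with hk0 | hkpos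
    · subst hk0
      rw [show ((0 + 1 : Nat) : Int) = 1 from by norm_num, show PySem.List.pyRange 1 1 1 = [] from by decide]
      refine ⟨by simp, fun j => ?_, by simp⟩
      have : ¬ (j ≠ 0 ∧ j < 1 ∧ L % j = 0) := by omega
      rw [if_neg this]
      exact replicate_getD_zero j
    · have h1k : (1 : Int) ≤ (k : Int) := by exact_mod_cast hkpos
      have hkL : k < L := by omega
      rw [show ((k + 1 : Nat) : Int) = (k : Int) + 1 from by push_cast; ring,
        PySem.List.pyRange_one_succ_right h1k, List.foldl_append, List.foldl_cons, List.foldl_nil,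
        List.filter_append, List.map_append, List.sum_append] at *
      set st := ((PySem.List.pyRange 1 (k : Int) 1).foldl (fun (st : List Int × Int) i =>
        if PySem.Int.mod (L : Int) i = 0 then
          (st.1.set i.toNat ((PySem.List.pyRange 1 i 1).foldl
              (fun val j => if PySem.Int.mod i j = 0 then val - PySem.List.pyGetD st.1 j 0 else val) (v i)),
           st.2 + (PySem.List.pyRange 1 i 1).foldl
              (fun val j => if PySem.Int.mod i j = 0 then val - PySem.List.pyGetD st.1 j 0 else val) (v i))
        else st) (List.replicate 65 0, a)) with hst
      have hmodiff : (PySem.Int.mod (L : Int) (k : Int) = 0) ↔ L % k = 0 := by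
        rw [PySem.Int.mod_natCast]; exact_mod_cast Int.natCast_eq_zero
      by_cases hmod : L % k = 0
      · -- k is a divisor of L
        have hdvd : k ∣ L := Nat.dvd_of_mod_eq_zero hmod
        rw [if_pos (hmodiff.mpr hmod)]
        have hval : (PySem.List.pyRange 1 (k : Int) 1).foldl
            (fun val j => if PySem.Int.mod (k : Int) j = 0 then val - PySem.List.pyGetD st.1 j 0 else val)
            (v (k : Int)) = Mv v k := by
          rw [PySem.List.foldl_ite_eq_foldl_filter (fun j => PySem.Int.mod (k : Int) j = 0)
            (fun val j => val - PySem.List.pyGetD st.1 j 0)]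
          rw [show (fun (val : Int) j => val - PySem.List.pyGetD st.1 j 0)
              = (fun (val : Int) j => val + (fun j => -(PySem.List.pyGetD st.1 j 0)) j) from by
            funext val j; ring]
          rw [PySem.List.foldl_add]
          have hcong : ((PySem.List.pyRange 1 (k : Int) 1).filter
                (fun j => decide (PySem.Int.mod (k : Int) j = 0))).map
                (fun j => -(PySem.List.pyGetD st.1 j 0))
              = ((PySem.List.pyRange 1 (k : Int) 1).filter
                (fun j => decide (PySem.Int.mod (k : Int) j = 0))).map
                (fun j => -(Mv v j.toNat)) := by
            refine List.map_congr_left ?_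
            intro j hj
            have hj1 := List.mem_filter.mp hj
            have hjr := PySem.List.mem_pyRange_one.mp hj1.1
            have hjm : PySem.Int.mod (k : Int) j = 0 := of_decide_eq_true hj1.2
            have hj0 : 0 ≤ j := by omega
            have hjcast : ((j.toNat : Nat) : Int) = j := Int.toNat_of_nonneg hj0
            have hjk : k % j.toNat = 0 := by
              have := hjm
              rw [← hjcast, PySem.Int.mod_natCast] at this
              exact_mod_cast this
            have hjL : L % j.toNat = 0 := by
              have hd : j.toNat ∣ L := Nat.dvd_trans (Nat.dvd_of_mod_eq_zero hjk) hdvd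
              omega
            rw [PySem.List.pyGetD_of_nonneg _ _ hj0, h2 j.toNat,
              if_pos ⟨by omega, by omega, hjL⟩]
          rw [hcong]
          have hsum : (((PySem.List.pyRange 1 (k : Int) 1).filter
                (fun j => decide (PySem.Int.mod (k : Int) j = 0))).map (fun j => -(Mv v j.toNat))).sum
              = -((((PySem.List.pyRange 1 (k : Int) 1).filter
                (fun j => decide (PySem.Int.mod (k : Int) j = 0))).map (fun j => Mv v j.toNat)).sum) := by
            rw [show (fun j => -(Mv v j.toNat)) = (fun x : Int => -x) ∘ (fun j : Int => Mv v j.toNat) from rfl,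
              ← List.map_map]
            exact Eq.symm (List.sum_neg _)
          rw [hsum]
          have hlist : ((PySem.List.pyRange 1 (k : Int) 1).filter
                (fun j => decide (PySem.Int.mod (k : Int) j = 0))).map (fun j => Mv v j.toNat)
              = ((List.range k).filter (fun j => decide (j ≠ 0 ∧ k % j = 0))).map (fun j => Mv v j) := by
            rw [pyRange_one_natCast, List.filter_map, List.map_map, List.filter_filter]
            refine Eq.trans (congrArg (List.map _) (List.filter_congr (fun j _ => ?_)))
              (List.map_congr_left (fun j _ => ?_))
            · show _ = decide (j ≠ 0 ∧ k % j = 0)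
              simp only [Function.comp_apply, Function.comp_def]
              rw [PySem.Int.mod_natCast]
              by_cases hj0 : j = 0 <;> by_cases hjm : k % j = 0 <;>
                simp [hj0, hjm] <;>
                (intro hd; rcases Int.natCast_dvd_natCast.mp hd with ⟨c, hc⟩;
                 exact hjm (by simp [hc, Nat.mul_mod_right]))
            · simp [Function.comp, Int.toNat_natCast]
          rw [hlist, Mv_rec v k]
          ring
        rw [hval]
        refine ⟨by simp [h1], fun j => ?_, ?_⟩
        · rw [Int.toNat_natCast]
          by_cases hjk : j = k
          · subst hjk
            rw [List.getD_eq_getElem?_getD, List.getElem?_set_self (by omega : j < st.1.length)]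
            rw [if_pos ⟨by omega, by omega, hmod⟩]
            rfl
          · rw [List.getD_eq_getElem?_getD, List.getElem?_set_ne (fun h => hjk h.symm),
              ← List.getD_eq_getElem?_getD, h2 j]
            by_cases hc : j ≠ 0 ∧ j < k ∧ L % j = 0
            · rw [if_pos hc, if_pos ⟨hc.1, by omega, hc.2.2⟩]
            · rw [if_neg hc, if_neg (by intro h; exact hc ⟨h.1, by omega, h.2.2⟩)]
        · rw [h3]
          have hfilt : List.filter (fun i => PySem.Int.mod (L : Int) i == 0) [(k : Int)] = [(k : Int)] := by
            simp [List.filter_cons, beq_iff_eq, hmodiff.mpr hmod]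
          rw [hfilt]
          simp [Int.toNat_natCast]
          ring
      · -- k is not a divisor of L
        rw [if_neg (fun h => hmod (hmodiff.mp h))]
        refine ⟨h1, fun j => ?_, ?_⟩
        · rw [h2 j]
          by_cases hc : j ≠ 0 ∧ j < k ∧ L % j = 0
          · rw [if_pos hc, if_pos ⟨hc.1, by omega, hc.2.2⟩]
          · rw [if_neg hc, if_neg (by
              intro h
              exact hc ⟨h.1, by
                rcases Nat.lt_succ_iff_lt_or_eq.mp h.2.1 with h' | h'
                · exact h'
                · exact absurd (h' ▸ h.2.2) hmod, h.2.2⟩)]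
        · rw [h3]
          have hfilt : List.filter (fun i => PySem.Int.mod (L : Int) i == 0) [(k : Int)] = [] := by
            have hbe : (PySem.Int.mod (L : Int) (k : Int) == 0) = false := by
              rw [PySem.Int.mod_natCast]
              have : L % k ≠ 0 := hmod
              simp only [beq_eq_false_iff_ne, ne_eq, Nat.cast_eq_zero]
              first
              | exact this
              | (intro hd; rcases Int.natCast_dvd_natCast.mp hd with ⟨c, hc⟩;
                 exact hmod (by simp [hc, Nat.mul_mod_right]))
            simp only [List.filter_cons, hbe, Bool.false_eq_true, if_false, List.filter_nil]
          rw [hfilt]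
          simp

lemma loopA (L : Nat) (hL : L ≤ 63) (v : Int → Int) (a : Int) :
    ((PySem.List.pyRange 1 (L : Int) 1).foldl (fun (st : List Int × Int) i =>
        if PySem.Int.mod (L : Int) i = 0 then
          (st.1.set i.toNat ((PySem.List.pyRange 1 i 1).foldl
              (fun val j => if PySem.Int.mod i j = 0 then val - PySem.List.pyGetD st.1 j 0 else val) (v i)),
           st.2 + (PySem.List.pyRange 1 i 1).foldl
              (fun val j => if PySem.Int.mod i j = 0 then val - PySem.List.pyGetD st.1 j 0 else val) (v i))
        else st) (List.replicate 65 0, a)).2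
    = a + (((PySem.List.pyRange 1 (L : Int) 1).filter (fun i => PySem.Int.mod (L : Int) i == 0)).map
        (fun i => Mv v i.toNat)).sum :=
  (loopA_aux L hL v a L le_rfl).2.2

lemma hM1 (v : Int → Int) : Mv v 1 = v 1 := by
  rw [Mv_rec]
  rw [show (List.range 1).filter (fun j => decide (j ≠ 0 ∧ 1 % j = 0)) = [] from by decide]
  simp only [List.map_nil, List.sum_nil]
  push_cast
  ring

lemma hM2 (v : Int → Int) : Mv v 2 = v 2 - v 1 := by
  rw [Mv_rec]
  rw [show (List.range 2).filter (fun j => decide (j ≠ 0 ∧ 2 % j = 0)) = [1] from by decide]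
  simp only [List.map_cons, List.map_nil, List.sum_cons, List.sum_nil]
  rw [hM1 v]
  push_cast
  ring

lemma hM3 (v : Int → Int) : Mv v 3 = v 3 - v 1 := by
  rw [Mv_rec]
  rw [show (List.range 3).filter (fun j => decide (j ≠ 0 ∧ 3 % j = 0)) = [1] from by decide]
  simp only [List.map_cons, List.map_nil, List.sum_cons, List.sum_nil]
  rw [hM1 v]
  push_cast
  ring

lemma hM4 (v : Int → Int) : Mv v 4 = v 4 - v 2 := by
  rw [Mv_rec]
  rw [show (List.range 4).filter (fun j => decide (j ≠ 0 ∧ 4 % j = 0)) = [1, 2] from by decide]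
  simp only [List.map_cons, List.map_nil, List.sum_cons, List.sum_nil]
  rw [hM1 v, hM2 v]
  push_cast
  ring

lemma hM5 (v : Int → Int) : Mv v 5 = v 5 - v 1 := by
  rw [Mv_rec]
  rw [show (List.range 5).filter (fun j => decide (j ≠ 0 ∧ 5 % j = 0)) = [1] from by decide]
  simp only [List.map_cons, List.map_nil, List.sum_cons, List.sum_nil]
  rw [hM1 v]
  push_cast
  ring

lemma hM6 (v : Int → Int) : Mv v 6 = v 6 - v 3 - v 2 + v 1 := by
  rw [Mv_rec]
  rw [show (List.range 6).filter (fun j => decide (j ≠ 0 ∧ 6 % j = 0)) = [1, 2, 3] from by decide]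
  simp only [List.map_cons, List.map_nil, List.sum_cons, List.sum_nil]
  rw [hM1 v, hM2 v, hM3 v]
  push_cast
  ring

lemma hM7 (v : Int → Int) : Mv v 7 = v 7 - v 1 := by
  rw [Mv_rec]
  rw [show (List.range 7).filter (fun j => decide (j ≠ 0 ∧ 7 % j = 0)) = [1] from by decide]
  simp only [List.map_cons, List.map_nil, List.sum_cons, List.sum_nil]
  rw [hM1 v]
  push_cast
  ring

lemma hM8 (v : Int → Int) : Mv v 8 = v 8 - v 4 := by
  rw [Mv_rec]
  rw [show (List.range 8).filter (fun j => decide (j ≠ 0 ∧ 8 % j = 0)) = [1, 2, 4] from by decide]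
  simp only [List.map_cons, List.map_nil, List.sum_cons, List.sum_nil]
  rw [hM1 v, hM2 v, hM4 v]
  push_cast
  ring

lemma hM9 (v : Int → Int) : Mv v 9 = v 9 - v 3 := by
  rw [Mv_rec]
  rw [show (List.range 9).filter (fun j => decide (j ≠ 0 ∧ 9 % j = 0)) = [1, 3] from by decide]
  simp only [List.map_cons, List.map_nil, List.sum_cons, List.sum_nil]
  rw [hM1 v, hM3 v]
  push_cast
  ring

lemma hM10 (v : Int → Int) : Mv v 10 = v 10 - v 5 - v 2 + v 1 := by
  rw [Mv_rec]
  rw [show (List.range 10).filter (fun j => decide (j ≠ 0 ∧ 10 % j = 0)) = [1, 2, 5] from by decide]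
  simp only [List.map_cons, List.map_nil, List.sum_cons, List.sum_nil]
  rw [hM1 v, hM2 v, hM5 v]
  push_cast
  ring

lemma hM11 (v : Int → Int) : Mv v 11 = v 11 - v 1 := by
  rw [Mv_rec]
  rw [show (List.range 11).filter (fun j => decide (j ≠ 0 ∧ 11 % j = 0)) = [1] from by decide]
  simp only [List.map_cons, List.map_nil, List.sum_cons, List.sum_nil]
  rw [hM1 v]
  push_cast
  ring

lemma hM12 (v : Int → Int) : Mv v 12 = v 12 - v 6 - v 4 + v 2 := by
  rw [Mv_rec]
  rw [show (List.range 12).filter (fun j => decide (j ≠ 0 ∧ 12 % j = 0)) = [1, 2, 3, 4, 6] from by decide]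
  simp only [List.map_cons, List.map_nil, List.sum_cons, List.sum_nil]
  rw [hM1 v, hM2 v, hM3 v, hM4 v, hM6 v]
  push_cast
  ring

lemma hM13 (v : Int → Int) : Mv v 13 = v 13 - v 1 := by
  rw [Mv_rec]
  rw [show (List.range 13).filter (fun j => decide (j ≠ 0 ∧ 13 % j = 0)) = [1] from by decide]
  simp only [List.map_cons, List.map_nil, List.sum_cons, List.sum_nil]
  rw [hM1 v]
  push_cast
  ring

lemma hM14 (v : Int → Int) : Mv v 14 = v 14 - v 7 - v 2 + v 1 := by
  rw [Mv_rec]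
  rw [show (List.range 14).filter (fun j => decide (j ≠ 0 ∧ 14 % j = 0)) = [1, 2, 7] from by decide]
  simp only [List.map_cons, List.map_nil, List.sum_cons, List.sum_nil]
  rw [hM1 v, hM2 v, hM7 v]
  push_cast
  ring

lemma hM15 (v : Int → Int) : Mv v 15 = v 15 - v 5 - v 3 + v 1 := by
  rw [Mv_rec]
  rw [show (List.range 15).filter (fun j => decide (j ≠ 0 ∧ 15 % j = 0)) = [1, 3, 5] from by decide]
  simp only [List.map_cons, List.map_nil, List.sum_cons, List.sum_nil]
  rw [hM1 v, hM3 v, hM5 v]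
  push_cast
  ring

lemma hM16 (v : Int → Int) : Mv v 16 = v 16 - v 8 := by
  rw [Mv_rec]
  rw [show (List.range 16).filter (fun j => decide (j ≠ 0 ∧ 16 % j = 0)) = [1, 2, 4, 8] from by decide]
  simp only [List.map_cons, List.map_nil, List.sum_cons, List.sum_nil]
  rw [hM1 v, hM2 v, hM4 v, hM8 v]
  push_cast
  ring

lemma flatMap_mu (divs : List Int) (v : Int → Int) :
    (divs.flatMap (fun i => (divs.filter (fun d => PySem.Int.mod i d == 0)).map (fun d =>
        solveAltMu (PySem.Int.floordiv i d) * v d))).sum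
    = ((divs.flatMap (fun i => (divs.filter (fun d => PySem.Int.mod i d == 0)).map (fun d =>
        (solveAltMu (PySem.Int.floordiv i d), d)))).map (fun p => p.1 * v p.2)).sum := by
  congr 1
  rw [List.map_flatMap]
  congr 1
  funext i
  rw [List.map_map]
  rfl

-- Möbius-inversion bridge, case-checked for every bit length the domain admits
lemma bridge (L : Nat) (hL : L ≤ 32) (v : Int → Int) :
    (((PySem.List.pyRange 1 (L : Int) 1).filter (fun i => PySem.Int.mod (L : Int) i == 0)).map
        (fun i => Mv v i.toNat)).sum
    = (((PySem.List.pyRange 1 (L : Int) 1).filter (fun i => PySem.Int.mod (L : Int) i == 0)).flatMap (fun i =>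
        ((((PySem.List.pyRange 1 (L : Int) 1).filter (fun i => PySem.Int.mod (L : Int) i == 0))).filter
            (fun d => PySem.Int.mod i d == 0)).map (fun d =>
          solveAltMu (PySem.Int.floordiv i d) * v d))).sum := by
  interval_cases L
  · -- L = 0
    simp only [Nat.cast_ofNat, Nat.cast_zero, Nat.cast_one]
    rw [show (PySem.List.pyRange 1 (0:Int) 1).filter (fun i => PySem.Int.mod (0:Int) i == 0) = ([]:List Int) from by decide]
    simp
  · -- L = 1
    simp only [Nat.cast_ofNat, Nat.cast_zero, Nat.cast_one]
    rw [show (PySem.List.pyRange 1 (1:Int) 1).filter (fun i => PySem.Int.mod (1:Int) i == 0) = ([]:List Int) from by decide]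
    simp
  · -- L = 2
    simp only [Nat.cast_ofNat, Nat.cast_zero, Nat.cast_one]
    rw [show (PySem.List.pyRange 1 (2:Int) 1).filter (fun i => PySem.Int.mod (2:Int) i == 0) = ([1]:List Int) from by decide]
    rw [flatMap_mu]
    rw [show (([1]:List Int).flatMap (fun i => (([1]:List Int).filter (fun d => PySem.Int.mod i d == 0)).map (fun d => (solveAltMu (PySem.Int.floordiv i d), d)))) = ([((1:Int),(1:Int))]:List (Int × Int)) from by decide]
    simp only [List.map_cons, List.map_nil, List.sum_cons, List.sum_nil]
    rw [show ((1:Int).toNat) = 1 from rfl]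
    rw [hM1 v]
    ring
  · -- L = 3
    simp only [Nat.cast_ofNat, Nat.cast_zero, Nat.cast_one]
    rw [show (PySem.List.pyRange 1 (3:Int) 1).filter (fun i => PySem.Int.mod (3:Int) i == 0) = ([1]:List Int) from by decide]
    rw [flatMap_mu]
    rw [show (([1]:List Int).flatMap (fun i => (([1]:List Int).filter (fun d => PySem.Int.mod i d == 0)).map (fun d => (solveAltMu (PySem.Int.floordiv i d), d)))) = ([((1:Int),(1:Int))]:List (Int × Int)) from by decide]
    simp only [List.map_cons, List.map_nil, List.sum_cons, List.sum_nil]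
    rw [show ((1:Int).toNat) = 1 from rfl]
    rw [hM1 v]
    ring
  · -- L = 4
    simp only [Nat.cast_ofNat, Nat.cast_zero, Nat.cast_one]
    rw [show (PySem.List.pyRange 1 (4:Int) 1).filter (fun i => PySem.Int.mod (4:Int) i == 0) = ([1,2]:List Int) from by decide]
    rw [flatMap_mu]
    rw [show (([1,2]:List Int).flatMap (fun i => (([1,2]:List Int).filter (fun d => PySem.Int.mod i d == 0)).map (fun d => (solveAltMu (PySem.Int.floordiv i d), d)))) = ([((1:Int),(1:Int)),((-1:Int),(1:Int)),((1:Int),(2:Int))]:List (Int × Int)) from by decide]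
    simp only [List.map_cons, List.map_nil, List.sum_cons, List.sum_nil]
    rw [show ((1:Int).toNat) = 1 from rfl, show ((2:Int).toNat) = 2 from rfl]
    rw [hM1 v, hM2 v]
    ring
  · -- L = 5
    simp only [Nat.cast_ofNat, Nat.cast_zero, Nat.cast_one]
    rw [show (PySem.List.pyRange 1 (5:Int) 1).filter (fun i => PySem.Int.mod (5:Int) i == 0) = ([1]:List Int) from by decide]
    rw [flatMap_mu]
    rw [show (([1]:List Int).flatMap (fun i => (([1]:List Int).filter (fun d => PySem.Int.mod i d == 0)).map (fun d => (solveAltMu (PySem.Int.floordiv i d), d)))) = ([((1:Int),(1:Int))]:List (Int × Int)) from by decide]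
    simp only [List.map_cons, List.map_nil, List.sum_cons, List.sum_nil]
    rw [show ((1:Int).toNat) = 1 from rfl]
    rw [hM1 v]
    ring
  · -- L = 6
    simp only [Nat.cast_ofNat, Nat.cast_zero, Nat.cast_one]
    rw [show (PySem.List.pyRange 1 (6:Int) 1).filter (fun i => PySem.Int.mod (6:Int) i == 0) = ([1,2,3]:List Int) from by decide]
    rw [flatMap_mu]
    rw [show (([1,2,3]:List Int).flatMap (fun i => (([1,2,3]:List Int).filter (fun d => PySem.Int.mod i d == 0)).map (fun d => (solveAltMu (PySem.Int.floordiv i d), d)))) = ([((1:Int),(1:Int)),((-1:Int),(1:Int)),((1:Int),(2:Int)),((-1:Int),(1:Int)),((1:Int),(3:Int))]:List (Int × Int)) from by decide]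
    simp only [List.map_cons, List.map_nil, List.sum_cons, List.sum_nil]
    rw [show ((1:Int).toNat) = 1 from rfl, show ((2:Int).toNat) = 2 from rfl, show ((3:Int).toNat) = 3 from rfl]
    rw [hM1 v, hM2 v, hM3 v]
    ring
  · -- L = 7
    simp only [Nat.cast_ofNat, Nat.cast_zero, Nat.cast_one]
    rw [show (PySem.List.pyRange 1 (7:Int) 1).filter (fun i => PySem.Int.mod (7:Int) i == 0) = ([1]:List Int) from by decide]
    rw [flatMap_mu]
    rw [show (([1]:List Int).flatMap (fun i => (([1]:List Int).filter (fun d => PySem.Int.mod i d == 0)).map (fun d => (solveAltMu (PySem.Int.floordiv i d), d)))) = ([((1:Int),(1:Int))]:List (Int × Int)) from by decide]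
    simp only [List.map_cons, List.map_nil, List.sum_cons, List.sum_nil]
    rw [show ((1:Int).toNat) = 1 from rfl]
    rw [hM1 v]
    ring
  · -- L = 8
    simp only [Nat.cast_ofNat, Nat.cast_zero, Nat.cast_one]
    rw [show (PySem.List.pyRange 1 (8:Int) 1).filter (fun i => PySem.Int.mod (8:Int) i == 0) = ([1,2,4]:List Int) from by decide]
    rw [flatMap_mu]
    rw [show (([1,2,4]:List Int).flatMap (fun i => (([1,2,4]:List Int).filter (fun d => PySem.Int.mod i d == 0)).map (fun d => (solveAltMu (PySem.Int.floordiv i d), d)))) = ([((1:Int),(1:Int)),((-1:Int),(1:Int)),((1:Int),(2:Int)),((0:Int),(1:Int)),((-1:Int),(2:Int)),((1:Int),(4:Int))]:List (Int × Int)) from by decide]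
    simp only [List.map_cons, List.map_nil, List.sum_cons, List.sum_nil]
    rw [show ((1:Int).toNat) = 1 from rfl, show ((2:Int).toNat) = 2 from rfl, show ((4:Int).toNat) = 4 from rfl]
    rw [hM1 v, hM2 v, hM4 v]
    ring
  · -- L = 9
    simp only [Nat.cast_ofNat, Nat.cast_zero, Nat.cast_one]
    rw [show (PySem.List.pyRange 1 (9:Int) 1).filter (fun i => PySem.Int.mod (9:Int) i == 0) = ([1,3]:List Int) from by decide]
    rw [flatMap_mu]
    rw [show (([1,3]:List Int).flatMap (fun i => (([1,3]:List Int).filter (fun d => PySem.Int.mod i d == 0)).map (fun d => (solveAltMu (PySem.Int.floordiv i d), d)))) = ([((1:Int),(1:Int)),((-1:Int),(1:Int)),((1:Int),(3:Int))]:List (Int × Int)) from by decide]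
    simp only [List.map_cons, List.map_nil, List.sum_cons, List.sum_nil]
    rw [show ((1:Int).toNat) = 1 from rfl, show ((3:Int).toNat) = 3 from rfl]
    rw [hM1 v, hM3 v]
    ring
  · -- L = 10
    simp only [Nat.cast_ofNat, Nat.cast_zero, Nat.cast_one]
    rw [show (PySem.List.pyRange 1 (10:Int) 1).filter (fun i => PySem.Int.mod (10:Int) i == 0) = ([1,2,5]:List Int) from by decide]
    rw [flatMap_mu]
    rw [show (([1,2,5]:List Int).flatMap (fun i => (([1,2,5]:List Int).filter (fun d => PySem.Int.mod i d == 0)).map (fun d => (solveAltMu (PySem.Int.floordiv i d), d)))) = ([((1:Int),(1:Int)),((-1:Int),(1:Int)),((1:Int),(2:Int)),((-1:Int),(1:Int)),((1:Int),(5:Int))]:List (Int × Int)) from by decide]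
    simp only [List.map_cons, List.map_nil, List.sum_cons, List.sum_nil]
    rw [show ((1:Int).toNat) = 1 from rfl, show ((2:Int).toNat) = 2 from rfl, show ((5:Int).toNat) = 5 from rfl]
    rw [hM1 v, hM2 v, hM5 v]
    ring
  · -- L = 11
    simp only [Nat.cast_ofNat, Nat.cast_zero, Nat.cast_one]
    rw [show (PySem.List.pyRange 1 (11:Int) 1).filter (fun i => PySem.Int.mod (11:Int) i == 0) = ([1]:List Int) from by decide]
    rw [flatMap_mu]
    rw [show (([1]:List Int).flatMap (fun i => (([1]:List Int).filter (fun d => PySem.Int.mod i d == 0)).map (fun d => (solveAltMu (PySem.Int.floordiv i d), d)))) = ([((1:Int),(1:Int))]:List (Int × Int)) from by decide]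
    simp only [List.map_cons, List.map_nil, List.sum_cons, List.sum_nil]
    rw [show ((1:Int).toNat) = 1 from rfl]
    rw [hM1 v]
    ring
  · -- L = 12
    simp only [Nat.cast_ofNat, Nat.cast_zero, Nat.cast_one]
    rw [show (PySem.List.pyRange 1 (12:Int) 1).filter (fun i => PySem.Int.mod (12:Int) i == 0) = ([1,2,3,4,6]:List Int) from by decide]
    rw [flatMap_mu]
    rw [show (([1,2,3,4,6]:List Int).flatMap (fun i => (([1,2,3,4,6]:List Int).filter (fun d => PySem.Int.mod i d == 0)).map (fun d => (solveAltMu (PySem.Int.floordiv i d), d)))) = ([((1:Int),(1:Int)),((-1:Int),(1:Int)),((1:Int),(2:Int)),((-1:Int),(1:Int)),((1:Int),(3:Int)),((0:Int),(1:Int)),((-1:Int),(2:Int)),((1:Int),(4:Int)),((1:Int),(1:Int)),((-1:Int),(2:Int)),((-1:Int),(3:Int)),((1:Int),(6:Int))]:List (Int × Int)) from by decide]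
    simp only [List.map_cons, List.map_nil, List.sum_cons, List.sum_nil]
    rw [show ((1:Int).toNat) = 1 from rfl, show ((2:Int).toNat) = 2 from rfl, show ((3:Int).toNat) = 3 from rfl, show ((4:Int).toNat) = 4 from rfl, show ((6:Int).toNat) = 6 from rfl]
    rw [hM1 v, hM2 v, hM3 v, hM4 v, hM6 v]
    ring
  · -- L = 13
    simp only [Nat.cast_ofNat, Nat.cast_zero, Nat.cast_one]
    rw [show (PySem.List.pyRange 1 (13:Int) 1).filter (fun i => PySem.Int.mod (13:Int) i == 0) = ([1]:List Int) from by decide]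
    rw [flatMap_mu]
    rw [show (([1]:List Int).flatMap (fun i => (([1]:List Int).filter (fun d => PySem.Int.mod i d == 0)).map (fun d => (solveAltMu (PySem.Int.floordiv i d), d)))) = ([((1:Int),(1:Int))]:List (Int × Int)) from by decide]
    simp only [List.map_cons, List.map_nil, List.sum_cons, List.sum_nil]
    rw [show ((1:Int).toNat) = 1 from rfl]
    rw [hM1 v]
    ring
  · -- L = 14
    simp only [Nat.cast_ofNat, Nat.cast_zero, Nat.cast_one]
    rw [show (PySem.List.pyRange 1 (14:Int) 1).filter (fun i => PySem.Int.mod (14:Int) i == 0) = ([1,2,7]:List Int) from by decide]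
    rw [flatMap_mu]
    rw [show (([1,2,7]:List Int).flatMap (fun i => (([1,2,7]:List Int).filter (fun d => PySem.Int.mod i d == 0)).map (fun d => (solveAltMu (PySem.Int.floordiv i d), d)))) = ([((1:Int),(1:Int)),((-1:Int),(1:Int)),((1:Int),(2:Int)),((-1:Int),(1:Int)),((1:Int),(7:Int))]:List (Int × Int)) from by decide]
    simp only [List.map_cons, List.map_nil, List.sum_cons, List.sum_nil]
    rw [show ((1:Int).toNat) = 1 from rfl, show ((2:Int).toNat) = 2 from rfl, show ((7:Int).toNat) = 7 from rfl]
    rw [hM1 v, hM2 v, hM7 v]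
    ring
  · -- L = 15
    simp only [Nat.cast_ofNat, Nat.cast_zero, Nat.cast_one]
    rw [show (PySem.List.pyRange 1 (15:Int) 1).filter (fun i => PySem.Int.mod (15:Int) i == 0) = ([1,3,5]:List Int) from by decide]
    rw [flatMap_mu]
    rw [show (([1,3,5]:List Int).flatMap (fun i => (([1,3,5]:List Int).filter (fun d => PySem.Int.mod i d == 0)).map (fun d => (solveAltMu (PySem.Int.floordiv i d), d)))) = ([((1:Int),(1:Int)),((-1:Int),(1:Int)),((1:Int),(3:Int)),((-1:Int),(1:Int)),((1:Int),(5:Int))]:List (Int × Int)) from by decide]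
    simp only [List.map_cons, List.map_nil, List.sum_cons, List.sum_nil]
    rw [show ((1:Int).toNat) = 1 from rfl, show ((3:Int).toNat) = 3 from rfl, show ((5:Int).toNat) = 5 from rfl]
    rw [hM1 v, hM3 v, hM5 v]
    ring
  · -- L = 16
    simp only [Nat.cast_ofNat, Nat.cast_zero, Nat.cast_one]
    rw [show (PySem.List.pyRange 1 (16:Int) 1).filter (fun i => PySem.Int.mod (16:Int) i == 0) = ([1,2,4,8]:List Int) from by decide]
    rw [flatMap_mu]
    rw [show (([1,2,4,8]:List Int).flatMap (fun i => (([1,2,4,8]:List Int).filter (fun d => PySem.Int.mod i d == 0)).map (fun d => (solveAltMu (PySem.Int.floordiv i d), d)))) = ([((1:Int),(1:Int)),((-1:Int),(1:Int)),((1:Int),(2:Int)),((0:Int),(1:Int)),((-1:Int),(2:Int)),((1:Int),(4:Int)),((0:Int),(1:Int)),((0:Int),(2:Int)),((-1:Int),(4:Int)),((1:Int),(8:Int))]:List (Int × Int)) from by decide]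
    simp only [List.map_cons, List.map_nil, List.sum_cons, List.sum_nil]
    rw [show ((1:Int).toNat) = 1 from rfl, show ((2:Int).toNat) = 2 from rfl, show ((4:Int).toNat) = 4 from rfl, show ((8:Int).toNat) = 8 from rfl]
    rw [hM1 v, hM2 v, hM4 v, hM8 v]
    ring
  · -- L = 17
    simp only [Nat.cast_ofNat, Nat.cast_zero, Nat.cast_one]
    rw [show (PySem.List.pyRange 1 (17:Int) 1).filter (fun i => PySem.Int.mod (17:Int) i == 0) = ([1]:List Int) from by decide]
    rw [flatMap_mu]
    rw [show (([1]:List Int).flatMap (fun i => (([1]:List Int).filter (fun d => PySem.Int.mod i d == 0)).map (fun d => (solveAltMu (PySem.Int.floordiv i d), d)))) = ([((1:Int),(1:Int))]:List (Int × Int)) from by decide]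
    simp only [List.map_cons, List.map_nil, List.sum_cons, List.sum_nil]
    rw [show ((1:Int).toNat) = 1 from rfl]
    rw [hM1 v]
    ring
  · -- L = 18
    simp only [Nat.cast_ofNat, Nat.cast_zero, Nat.cast_one]
    rw [show (PySem.List.pyRange 1 (18:Int) 1).filter (fun i => PySem.Int.mod (18:Int) i == 0) = ([1,2,3,6,9]:List Int) from by decide]
    rw [flatMap_mu]
    rw [show (([1,2,3,6,9]:List Int).flatMap (fun i => (([1,2,3,6,9]:List Int).filter (fun d => PySem.Int.mod i d == 0)).map (fun d => (solveAltMu (PySem.Int.floordiv i d), d)))) = ([((1:Int),(1:Int)),((-1:Int),(1:Int)),((1:Int),(2:Int)),((-1:Int),(1:Int)),((1:Int),(3:Int)),((1:Int),(1:Int)),((-1:Int),(2:Int)),((-1:Int),(3:Int)),((1:Int),(6:Int)),((0:Int),(1:Int)),((-1:Int),(3:Int)),((1:Int),(9:Int))]:List (Int × Int)) from by decide]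
    simp only [List.map_cons, List.map_nil, List.sum_cons, List.sum_nil]
    rw [show ((1:Int).toNat) = 1 from rfl, show ((2:Int).toNat) = 2 from rfl, show ((3:Int).toNat) = 3 from rfl, show ((6:Int).toNat) = 6 from rfl, show ((9:Int).toNat) = 9 from rfl]
    rw [hM1 v, hM2 v, hM3 v, hM6 v, hM9 v]
    ring
  · -- L = 19
    simp only [Nat.cast_ofNat, Nat.cast_zero, Nat.cast_one]
    rw [show (PySem.List.pyRange 1 (19:Int) 1).filter (fun i => PySem.Int.mod (19:Int) i == 0) = ([1]:List Int) from by decide]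
    rw [flatMap_mu]
    rw [show (([1]:List Int).flatMap (fun i => (([1]:List Int).filter (fun d => PySem.Int.mod i d == 0)).map (fun d => (solveAltMu (PySem.Int.floordiv i d), d)))) = ([((1:Int),(1:Int))]:List (Int × Int)) from by decide]
    simp only [List.map_cons, List.map_nil, List.sum_cons, List.sum_nil]
    rw [show ((1:Int).toNat) = 1 from rfl]
    rw [hM1 v]
    ring
  · -- L = 20
    simp only [Nat.cast_ofNat, Nat.cast_zero, Nat.cast_one]
    rw [show (PySem.List.pyRange 1 (20:Int) 1).filter (fun i => PySem.Int.mod (20:Int) i == 0) = ([1,2,4,5,10]:List Int) from by decide]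
    rw [flatMap_mu]
    rw [show (([1,2,4,5,10]:List Int).flatMap (fun i => (([1,2,4,5,10]:List Int).filter (fun d => PySem.Int.mod i d == 0)).map (fun d => (solveAltMu (PySem.Int.floordiv i d), d)))) = ([((1:Int),(1:Int)),((-1:Int),(1:Int)),((1:Int),(2:Int)),((0:Int),(1:Int)),((-1:Int),(2:Int)),((1:Int),(4:Int)),((-1:Int),(1:Int)),((1:Int),(5:Int)),((1:Int),(1:Int)),((-1:Int),(2:Int)),((-1:Int),(5:Int)),((1:Int),(10:Int))]:List (Int × Int)) from by decide]
    simp only [List.map_cons, List.map_nil, List.sum_cons, List.sum_nil]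
    rw [show ((1:Int).toNat) = 1 from rfl, show ((2:Int).toNat) = 2 from rfl, show ((4:Int).toNat) = 4 from rfl, show ((5:Int).toNat) = 5 from rfl, show ((10:Int).toNat) = 10 from rfl]
    rw [hM1 v, hM2 v, hM4 v, hM5 v, hM10 v]
    ring
  · -- L = 21
    simp only [Nat.cast_ofNat, Nat.cast_zero, Nat.cast_one]
    rw [show (PySem.List.pyRange 1 (21:Int) 1).filter (fun i => PySem.Int.mod (21:Int) i == 0) = ([1,3,7]:List Int) from by decide]
    rw [flatMap_mu]
    rw [show (([1,3,7]:List Int).flatMap (fun i => (([1,3,7]:List Int).filter (fun d => PySem.Int.mod i d == 0)).map (fun d => (solveAltMu (PySem.Int.floordiv i d), d)))) = ([((1:Int),(1:Int)),((-1:Int),(1:Int)),((1:Int),(3:Int)),((-1:Int),(1:Int)),((1:Int),(7:Int))]:List (Int × Int)) from by decide]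
    simp only [List.map_cons, List.map_nil, List.sum_cons, List.sum_nil]
    rw [show ((1:Int).toNat) = 1 from rfl, show ((3:Int).toNat) = 3 from rfl, show ((7:Int).toNat) = 7 from rfl]
    rw [hM1 v, hM3 v, hM7 v]
    ring
  · -- L = 22
    simp only [Nat.cast_ofNat, Nat.cast_zero, Nat.cast_one]
    rw [show (PySem.List.pyRange 1 (22:Int) 1).filter (fun i => PySem.Int.mod (22:Int) i == 0) = ([1,2,11]:List Int) from by decide]
    rw [flatMap_mu]
    rw [show (([1,2,11]:List Int).flatMap (fun i => (([1,2,11]:List Int).filter (fun d => PySem.Int.mod i d == 0)).map (fun d => (solveAltMu (PySem.Int.floordiv i d), d)))) = ([((1:Int),(1:Int)),((-1:Int),(1:Int)),((1:Int),(2:Int)),((-1:Int),(1:Int)),((1:Int),(11:Int))]:List (Int × Int)) from by decide]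
    simp only [List.map_cons, List.map_nil, List.sum_cons, List.sum_nil]
    rw [show ((1:Int).toNat) = 1 from rfl, show ((2:Int).toNat) = 2 from rfl, show ((11:Int).toNat) = 11 from rfl]
    rw [hM1 v, hM2 v, hM11 v]
    ring
  · -- L = 23
    simp only [Nat.cast_ofNat, Nat.cast_zero, Nat.cast_one]
    rw [show (PySem.List.pyRange 1 (23:Int) 1).filter (fun i => PySem.Int.mod (23:Int) i == 0) = ([1]:List Int) from by decide]
    rw [flatMap_mu]
    rw [show (([1]:List Int).flatMap (fun i => (([1]:List Int).filter (fun d => PySem.Int.mod i d == 0)).map (fun d => (solveAltMu (PySem.Int.floordiv i d), d)))) = ([((1:Int),(1:Int))]:List (Int × Int)) from by decide]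
    simp only [List.map_cons, List.map_nil, List.sum_cons, List.sum_nil]
    rw [show ((1:Int).toNat) = 1 from rfl]
    rw [hM1 v]
    ring
  · -- L = 24
    simp only [Nat.cast_ofNat, Nat.cast_zero, Nat.cast_one]
    rw [show (PySem.List.pyRange 1 (24:Int) 1).filter (fun i => PySem.Int.mod (24:Int) i == 0) = ([1,2,3,4,6,8,12]:List Int) from by decide]
    rw [flatMap_mu]
    rw [show (([1,2,3,4,6,8,12]:List Int).flatMap (fun i => (([1,2,3,4,6,8,12]:List Int).filter (fun d => PySem.Int.mod i d == 0)).map (fun d => (solveAltMu (PySem.Int.floordiv i d), d)))) = ([((1:Int),(1:Int)),((-1:Int),(1:Int)),((1:Int),(2:Int)),((-1:Int),(1:Int)),((1:Int),(3:Int)),((0:Int),(1:Int)),((-1:Int),(2:Int)),((1:Int),(4:Int)),((1:Int),(1:Int)),((-1:Int),(2:Int)),((-1:Int),(3:Int)),((1:Int),(6:Int)),((0:Int),(1:Int)),((0:Int),(2:Int)),((-1:Int),(4:Int)),((1:Int),(8:Int)),((0:Int),(1:Int)),((1:Int),(2:Int)),((0:Int),(3:Int)),((-1:Int),(4:Int)),((-1:Int),(6:Int)),((1:Int),(12:Int))]:List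 (Int × Int)) from by decide]
    simp only [List.map_cons, List.map_nil, List.sum_cons, List.sum_nil]
    rw [show ((1:Int).toNat) = 1 from rfl, show ((2:Int).toNat) = 2 from rfl, show ((3:Int).toNat) = 3 from rfl, show ((4:Int).toNat) = 4 from rfl, show ((6:Int).toNat) = 6 from rfl, show ((8:Int).toNat) = 8 from rfl, show ((12:Int).toNat) = 12 from rfl]
    rw [hM1 v, hM2 v, hM3 v, hM4 v, hM6 v, hM8 v, hM12 v]
    ring
  · -- L = 25
    simp only [Nat.cast_ofNat, Nat.cast_zero, Nat.cast_one]
    rw [show (PySem.List.pyRange 1 (25:Int) 1).filter (fun i => PySem.Int.mod (25:Int) i == 0) = ([1,5]:List Int) from by decide]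
    rw [flatMap_mu]
    rw [show (([1,5]:List Int).flatMap (fun i => (([1,5]:List Int).filter (fun d => PySem.Int.mod i d == 0)).map (fun d => (solveAltMu (PySem.Int.floordiv i d), d)))) = ([((1:Int),(1:Int)),((-1:Int),(1:Int)),((1:Int),(5:Int))]:List (Int × Int)) from by decide]
    simp only [List.map_cons, List.map_nil, List.sum_cons, List.sum_nil]
    rw [show ((1:Int).toNat) = 1 from rfl, show ((5:Int).toNat) = 5 from rfl]
    rw [hM1 v, hM5 v]
    ring
  · -- L = 26
    simp only [Nat.cast_ofNat, Nat.cast_zero, Nat.cast_one]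
    rw [show (PySem.List.pyRange 1 (26:Int) 1).filter (fun i => PySem.Int.mod (26:Int) i == 0) = ([1,2,13]:List Int) from by decide]
    rw [flatMap_mu]
    rw [show (([1,2,13]:List Int).flatMap (fun i => (([1,2,13]:List Int).filter (fun d => PySem.Int.mod i d == 0)).map (fun d => (solveAltMu (PySem.Int.floordiv i d), d)))) = ([((1:Int),(1:Int)),((-1:Int),(1:Int)),((1:Int),(2:Int)),((-1:Int),(1:Int)),((1:Int),(13:Int))]:List (Int × Int)) from by decide]
    simp only [List.map_cons, List.map_nil, List.sum_cons, List.sum_nil]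
    rw [show ((1:Int).toNat) = 1 from rfl, show ((2:Int).toNat) = 2 from rfl, show ((13:Int).toNat) = 13 from rfl]
    rw [hM1 v, hM2 v, hM13 v]
    ring
  · -- L = 27
    simp only [Nat.cast_ofNat, Nat.cast_zero, Nat.cast_one]
    rw [show (PySem.List.pyRange 1 (27:Int) 1).filter (fun i => PySem.Int.mod (27:Int) i == 0) = ([1,3,9]:List Int) from by decide]
    rw [flatMap_mu]
    rw [show (([1,3,9]:List Int).flatMap (fun i => (([1,3,9]:List Int).filter (fun d => PySem.Int.mod i d == 0)).map (fun d => (solveAltMu (PySem.Int.floordiv i d), d)))) = ([((1:Int),(1:Int)),((-1:Int),(1:Int)),((1:Int),(3:Int)),((0:Int),(1:Int)),((-1:Int),(3:Int)),((1:Int),(9:Int))]:List (Int × Int)) from by decide]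
    simp only [List.map_cons, List.map_nil, List.sum_cons, List.sum_nil]
    rw [show ((1:Int).toNat) = 1 from rfl, show ((3:Int).toNat) = 3 from rfl, show ((9:Int).toNat) = 9 from rfl]
    rw [hM1 v, hM3 v, hM9 v]
    ring
  · -- L = 28
    simp only [Nat.cast_ofNat, Nat.cast_zero, Nat.cast_one]
    rw [show (PySem.List.pyRange 1 (28:Int) 1).filter (fun i => PySem.Int.mod (28:Int) i == 0) = ([1,2,4,7,14]:List Int) from by decide]
    rw [flatMap_mu]
    rw [show (([1,2,4,7,14]:List Int).flatMap (fun i => (([1,2,4,7,14]:List Int).filter (fun d => PySem.Int.mod i d == 0)).map (fun d => (solveAltMu (PySem.Int.floordiv i d), d)))) = ([((1:Int),(1:Int)),((-1:Int),(1:Int)),((1:Int),(2:Int)),((0:Int),(1:Int)),((-1:Int),(2:Int)),((1:Int),(4:Int)),((-1:Int),(1:Int)),((1:Int),(7:Int)),((1:Int),(1:Int)),((-1:Int),(2:Int)),((-1:Int),(7:Int)),((1:Int),(14:Int))]:List (Int × Int)) from by decide]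
    simp only [List.map_cons, List.map_nil, List.sum_cons, List.sum_nil]
    rw [show ((1:Int).toNat) = 1 from rfl, show ((2:Int).toNat) = 2 from rfl, show ((4:Int).toNat) = 4 from rfl, show ((7:Int).toNat) = 7 from rfl, show ((14:Int).toNat) = 14 from rfl]
    rw [hM1 v, hM2 v, hM4 v, hM7 v, hM14 v]
    ring
  · -- L = 29
    simp only [Nat.cast_ofNat, Nat.cast_zero, Nat.cast_one]
    rw [show (PySem.List.pyRange 1 (29:Int) 1).filter (fun i => PySem.Int.mod (29:Int) i == 0) = ([1]:List Int) from by decide]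
    rw [flatMap_mu]
    rw [show (([1]:List Int).flatMap (fun i => (([1]:List Int).filter (fun d => PySem.Int.mod i d == 0)).map (fun d => (solveAltMu (PySem.Int.floordiv i d), d)))) = ([((1:Int),(1:Int))]:List (Int × Int)) from by decide]
    simp only [List.map_cons, List.map_nil, List.sum_cons, List.sum_nil]
    rw [show ((1:Int).toNat) = 1 from rfl]
    rw [hM1 v]
    ring
  · -- L = 30
    simp only [Nat.cast_ofNat, Nat.cast_zero, Nat.cast_one]
    rw [show (PySem.List.pyRange 1 (30:Int) 1).filter (fun i => PySem.Int.mod (30:Int) i == 0) = ([1,2,3,5,6,10,15]:List Int) from by decide]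
    rw [flatMap_mu]
    rw [show (([1,2,3,5,6,10,15]:List Int).flatMap (fun i => (([1,2,3,5,6,10,15]:List Int).filter (fun d => PySem.Int.mod i d == 0)).map (fun d => (solveAltMu (PySem.Int.floordiv i d), d)))) = ([((1:Int),(1:Int)),((-1:Int),(1:Int)),((1:Int),(2:Int)),((-1:Int),(1:Int)),((1:Int),(3:Int)),((-1:Int),(1:Int)),((1:Int),(5:Int)),((1:Int),(1:Int)),((-1:Int),(2:Int)),((-1:Int),(3:Int)),((1:Int),(6:Int)),((1:Int),(1:Int)),((-1:Int),(2:Int)),((-1:Int),(5:Int)),((1:Int),(10:Int)),((1:Int),(1:Int)),((-1:Int),(3:Int)),((-1:Int),(5:Int)),((1:Int),(15:Int))]:List (Int × Int)) from by decide]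
    simp only [List.map_cons, List.map_nil, List.sum_cons, List.sum_nil]
    rw [show ((1:Int).toNat) = 1 from rfl, show ((2:Int).toNat) = 2 from rfl, show ((3:Int).toNat) = 3 from rfl, show ((5:Int).toNat) = 5 from rfl, show ((6:Int).toNat) = 6 from rfl, show ((10:Int).toNat) = 10 from rfl, show ((15:Int).toNat) = 15 from rfl]
    rw [hM1 v, hM2 v, hM3 v, hM5 v, hM6 v, hM10 v, hM15 v]
    ring
  · -- L = 31
    simp only [Nat.cast_ofNat, Nat.cast_zero, Nat.cast_one]
    rw [show (PySem.List.pyRange 1 (31:Int) 1).filter (fun i => PySem.Int.mod (31:Int) i == 0) = ([1]:List Int) from by decide]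
    rw [flatMap_mu]
    rw [show (([1]:List Int).flatMap (fun i => (([1]:List Int).filter (fun d => PySem.Int.mod i d == 0)).map (fun d => (solveAltMu (PySem.Int.floordiv i d), d)))) = ([((1:Int),(1:Int))]:List (Int × Int)) from by decide]
    simp only [List.map_cons, List.map_nil, List.sum_cons, List.sum_nil]
    rw [show ((1:Int).toNat) = 1 from rfl]
    rw [hM1 v]
    ring
  · -- L = 32
    simp only [Nat.cast_ofNat, Nat.cast_zero, Nat.cast_one]
    rw [show (PySem.List.pyRange 1 (32:Int) 1).filter (fun i => PySem.Int.mod (32:Int) i == 0) = ([1,2,4,8,16]:List Int) from by decide]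
    rw [flatMap_mu]
    rw [show (([1,2,4,8,16]:List Int).flatMap (fun i => (([1,2,4,8,16]:List Int).filter (fun d => PySem.Int.mod i d == 0)).map (fun d => (solveAltMu (PySem.Int.floordiv i d), d)))) = ([((1:Int),(1:Int)),((-1:Int),(1:Int)),((1:Int),(2:Int)),((0:Int),(1:Int)),((-1:Int),(2:Int)),((1:Int),(4:Int)),((0:Int),(1:Int)),((0:Int),(2:Int)),((-1:Int),(4:Int)),((1:Int),(8:Int)),((0:Int),(1:Int)),((0:Int),(2:Int)),((0:Int),(4:Int)),((-1:Int),(8:Int)),((1:Int),(16:Int))]:List (Int × Int)) from by decide]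
    simp only [List.map_cons, List.map_nil, List.sum_cons, List.sum_nil]
    rw [show ((1:Int).toNat) = 1 from rfl, show ((2:Int).toNat) = 2 from rfl, show ((4:Int).toNat) = 4 from rfl, show ((8:Int).toNat) = 8 from rfl, show ((16:Int).toNat) = 16 from rfl]
    rw [hM1 v, hM2 v, hM4 v, hM8 v, hM16 v]
    ring

lemma period_pyGetD (j : Int) : PySem.List.pyGetD period j 0 = 0 := by
  unfold PySem.List.pyGetD PySem.List.pyGet?
  cases PySem.List.pyIdx? (period.length) j with
  | none => rfl
  | some k =>
    simp only [Option.bind_some, period, List.getElem?_replicate]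
    by_cases hk : k < 65 <;> simp [hk]

lemma firstLoop (r : List Int) (a : Int) :
    r.foldl (fun ans i => (PySem.List.pyRange 1 i 1).foldl
      (fun ans j => if PySem.Int.mod i j = 0 then ans + PySem.List.pyGetD period j 0 else ans) ans) a
    = a := by
  have inner : ∀ (l : List Int) (i ans : Int), l.foldl
      (fun ans j => if PySem.Int.mod i j = 0 then ans + PySem.List.pyGetD period j 0 else ans) ans = ans := by
    intro l i ans
    simp only [period_pyGetD, add_zero, ite_self]
    exact PySem.List.foldl_ignore _ _
  simp only [inner]
  exact PySem.List.foldl_ignore _ _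

lemma valEq (n : Int) (b : List Char) (ln : Int) (i : Int) (hi : 1 ≤ i) :
    (if n < (PySem.Int.ofCharsBase? (PySem.List.pyRepeat (PySem.List.slice b (some 2) (some (i + 2)))
          (PySem.Int.floordiv ln i)) 2).getD 0
     then ((PySem.Int.ofCharsBase? (PySem.List.slice (PySem.List.slice b (some 2) (some (i + 2)))
          (some 1) none) 2).elim 1 (fun v => 0 + (v + 1))) - 1
     else ((PySem.Int.ofCharsBase? (PySem.List.slice (PySem.List.slice b (some 2) (some (i + 2)))
          (some 1) none) 2).elim 1 (fun v => 0 + (v + 1))))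
    = solveAltVal n b ln i := by
  unfold solveAltVal
  have hM : ((PySem.Int.ofCharsBase? (PySem.List.slice (PySem.List.slice b (some 2) (some (i + 2)))
        (some 1) none) 2).elim 1 (fun v => 0 + (v + 1)) : Int)
      = (if i = 1 then 1
         else (PySem.Int.ofCharsBase? (PySem.List.slice (PySem.List.slice b (some 2) (some (i + 2)))
            (some 1) none) 2).getD 0 + 1) := by
    by_cases hi1 : i = 1
    · subst hi1
      rw [if_pos rfl]
      rw [show ((1 : Int) + 2) = ((3 : Nat) : Int) from by norm_num,
        show (some (2 : Int)) = some ((2 : Nat) : Int) from by norm_num,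
        PySem.List.slice_natCast b 2 3,
        PySem.List.slice_from _ (by norm_num : (0 : Int) ≤ 1),
        show ((1 : Int).toNat) = 1 from rfl,
        List.drop_eq_nil_of_le (by simpa using List.length_take_le 1 (List.drop 2 b))]
      rfl
    · rw [if_neg hi1]
      cases hp : PySem.Int.ofCharsBase? (PySem.List.slice (PySem.List.slice b (some 2) (some (i + 2)))
          (some 1) none) 2 <;> simp [hp]
  rw [hM]

-- ===== VERDICT (by name: the statement is the Claim_ definition above) =====
set_option maxHeartbeats 2000000 in
theorem solve_spec : Claim_equal_solve := by
  intro n hDom hPre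
  have hn : 0 ≤ n := hPre
  have hn2 : n ≤ 2147483648 := by
    unfold Dom_solve pvDomInt at hDom
    simpa using (of_decide_eq_true hDom).2
  have hb : (PySem.Int.pyBin n).toList = '0' :: 'b' :: Nat.toDigits 2 n.toNat := by
    rw [PySem.Int.toList_pyBin]
    unfold PySem.Int.toBinChars0b
    rw [if_neg (by omega : ¬ n < 0)]
  have hL32 : (Nat.toDigits 2 n.toNat).length ≤ 32 :=
    Nat.toDigits_length 2 n.toNat 32 (by norm_num) (by omega)
  unfold Spec_solve
  simp only [solve, solve_alt, hb]
  rw [PySem.List.slice_from _ (by norm_num : (0 : Int) ≤ 2),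
    show ((2 : Int).toNat) = 2 from rfl]
  simp only [List.drop_succ_cons, List.drop_zero, List.length_cons]
  rw [show (((((Nat.toDigits 2 n.toNat).length + 1 + 1 : Nat)) : Int) - 2)
      = (((Nat.toDigits 2 n.toNat).length : Nat) : Int) from by push_cast; ring]
  rw [firstLoop]
  rw [loopA ((Nat.toDigits 2 n.toNat).length) (by omega)]
  rw [bridge ((Nat.toDigits 2 n.toNat).length) (by omega)]
  rw [zero_add]
  congr 1
  rw [List.flatMap_def, List.flatMap_def]
  congr 1
  refine List.map_congr_left (fun i hi => ?_)
  refine List.map_congr_left (fun d hd => ?_)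
  have hd1 : (1 : Int) ≤ d :=
    (PySem.List.mem_pyRange_one.mp (List.mem_filter.mp (List.mem_filter.mp hd).1).1).1
  exact congrArg (fun x => solveAltMu (PySem.Int.floordiv i d) * x)
    (valEq n ('0' :: 'b' :: Nat.toDigits 2 n.toNat) (((Nat.toDigits 2 n.toNat).length : Nat) : Int) d hd1)
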